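-- pv_equiv track=rewrite | github.com/Ko-udon/Algorithm-lv1 | pyalgo_알고리즘 베스트10 문제풀이/pyalgo_알고리즘_베스트10_문제풀이.py | solution
-- ===== SOURCE A (Python) =====
-- def solution(data):
--     right = min(data)
--     left = max(data)
--     while True:
--         if data.index(left) > data.index(right):
--             data.remove(left)
--             left = max(data)
--         else:
--             return left - right
-- ===== SOURCE B (Python) =====
-- def solution(data):
--     mn = data[0]
--     run_mx = data[0]
--     ans_mx = data[0]
--     for x in data[1:]:
--         if x > run_mx:
--             run_mx = x
--         if x < mn:
--             mn = x
--             ans_mx = run_mx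
--     return ans_mx - mn
-- ===== Notes on version B (the rewrite author's own statement) =====
-- stated objective: faster
-- what changed: A repeatedly recomputes max/index and removes elements from the list (quadratic repeated scans); B is a single left-to-right pass tracking the running max, the min so far, and the running max frozen at each new min, returning frozen-max minus min.
import Mathlib
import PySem

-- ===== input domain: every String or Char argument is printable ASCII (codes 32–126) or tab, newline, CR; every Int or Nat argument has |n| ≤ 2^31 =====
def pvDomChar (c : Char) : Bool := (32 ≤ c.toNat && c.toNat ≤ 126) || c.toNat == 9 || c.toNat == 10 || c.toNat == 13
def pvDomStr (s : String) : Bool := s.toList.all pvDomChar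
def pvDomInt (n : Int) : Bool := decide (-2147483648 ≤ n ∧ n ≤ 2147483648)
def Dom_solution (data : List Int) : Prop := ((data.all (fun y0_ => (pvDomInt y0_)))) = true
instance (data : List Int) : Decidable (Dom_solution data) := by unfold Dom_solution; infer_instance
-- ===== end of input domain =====

-- B replaces A's quadratic remove-the-max loop by a single pass (running max, min so far,
-- running max frozen at each new min); A mutates its argument (remove), B does not — the
-- equivalence proved here is about the RETURN value only.

-- ===== PORT A =====
-- helper lemma needed by the port's termination proof
theorem pvRemoveLen {xs d' : List Int} {v : Int} (h : PySem.List.remove? xs v = some d') :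
    d'.length < xs.length := by
  have hv : v ∈ xs := by
    by_contra hc
    rw [(PySem.List.remove?_eq_none_iff xs v).mpr hc] at h
    cases h
  have h2 := PySem.List.remove?_eq_some_erase xs v hv
  rw [h] at h2
  injection h2 with h2
  subst h2
  have hlen := List.length_erase_of_mem hv
  have hpos := List.length_pos_of_mem hv
  omega

def solutionLoop (data : List Int) (left right : Int) : Int :=
  -- 'while True: if data.index(left) > data.index(right): data.remove(left); left = max(data) else: return left - right'
  -- '.getD 0' and the 'none' arms are totality guards where Python's index/remove/max would raise
  if (PySem.List.index? data left).getD 0 > (PySem.List.index? data right).getD 0 then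
    match hrem : PySem.List.remove? data left with
    | some d' =>
      match PySem.List.max? d' (fun y => y) with
      | some l' => solutionLoop d' l' right
      | none => 0
    | none => 0
  else
    left - right
termination_by data.length
decreasing_by exact pvRemoveLen hrem

def solution (data : List Int) : Int :=
  match PySem.List.min? data (fun y => y), PySem.List.max? data (fun y => y) with
  | some right, some left => solutionLoop data left right
  | _, _ => 0  -- Python raises ValueError on the empty list; excluded by Pre_

-- ===== PORT B =====
-- one step of Source B's for-loop over the state (mn, run_mx, ans_mx)
def altStep (st : Int × Int × Int) (y : Int) : Int × Int × Int :=
  let run := if y > st.2.1 then y else st.2.1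
  if y < st.1 then (y, run, run) else (st.1, run, st.2.2)

def solution_alt (data : List Int) : Int :=
  match data with
  | [] => 0  -- Source B raises IndexError (data[0]) on the empty list; excluded by Pre_
  | x :: xs =>
    let s := xs.foldl altStep (x, x, x)
    s.2.2 - s.1

-- ===== PRECONDITION & SPEC =====
-- Pre_ excludes only the empty list, on which both Pythons raise (ValueError / IndexError).
def Pre_solution (data : List Int) : Prop := data ≠ []
instance (data : List Int) : Decidable (Pre_solution data) := by unfold Pre_solution; infer_instance
def pvWitness_solution : List Int := ([3, 1, 2] : List Int)

def Spec_solution (data : List Int) (out : Int) : Prop := out = solution_alt data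
instance (data : List Int) (out : Int) : Decidable (Spec_solution data out) := by unfold Spec_solution; infer_instance

-- ===== CLAIM (what is proved, stated in full; the proofs are below) =====
def Claim_equal_solution : Prop := ∀ (data : List Int), Dom_solution data → Pre_solution data → Spec_solution data (solution data)

-- ===== LEMMAS AND PROOFS =====

-- B-side: one foldl step in min/max form
theorem altStep_eq (mn run ans y : Int) :
    altStep (mn, run, ans) y = if y < mn then (min mn y, max run y, max run y) else (mn, max run y, ans) := by
  unfold altStep
  simp only []
  split_ifs with h1 h2 h2 <;> simp_all <;> omega

-- B-side: components of the fold are the running min / running max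
theorem fold_run (l : List Int) : ∀ (mn run ans : Int),
    (l.foldl altStep (mn, run, ans)).1 = l.foldl min mn ∧
    (l.foldl altStep (mn, run, ans)).2.1 = l.foldl max run := by
  induction l with
  | nil => intro mn run ans; exact ⟨rfl, rfl⟩
  | cons y l ih =>
    intro mn run ans
    simp only [List.foldl_cons, altStep_eq]
    split_ifs with h
    · have hm : min mn y = y := by omega
      rw [hm]; exact ih y (max run y) (max run y)
    · have hm : min mn y = mn := by omega
      rw [hm]; exact ih mn (max run y) ans

-- B-side: once mn is a lower bound of the rest, mn and ans never change
theorem fold_frozen (l : List Int) : ∀ (mn run ans : Int), (∀ y ∈ l, mn ≤ y) →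
    (l.foldl altStep (mn, run, ans)).1 = mn ∧ (l.foldl altStep (mn, run, ans)).2.2 = ans := by
  induction l with
  | nil => intro mn run ans _; exact ⟨rfl, rfl⟩
  | cons y l ih =>
    intro mn run ans h
    have hy : mn ≤ y := h y (List.mem_cons_self)
    simp only [List.foldl_cons, altStep_eq]
    rw [if_neg (by omega)]
    exact ih mn (max run y) ans (fun z hz => h z (List.mem_cons_of_mem _ hz))

-- B equals prefix-max minus min on the canonical decomposition
theorem alt_spec (Q t : List Int) (m : Int)
    (hQ : ∀ q ∈ Q, m < q) (ht : ∀ y ∈ t, m ≤ y) :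
    solution_alt (Q ++ m :: t) = Q.foldl max m - m := by
  cases Q with
  | nil =>
    simp only [List.nil_append, solution_alt, List.foldl_nil]
    have := fold_frozen t m m m ht
    omega
  | cons q Q' =>
    have hmq : m < q := hQ q (List.mem_cons_self)
    simp only [List.cons_append, solution_alt, List.foldl_append]
    obtain ⟨h1, h2⟩ := fold_run Q' q q q
    set s1 := Q'.foldl altStep (q, q, q) with hs1
    obtain ⟨mn1, run1, ans1⟩ := s1
    simp only at h1 h2
    subst h1; subst h2
    have hmin_mem := PySem.List.foldl_min_mem Q' q
    have hmin_gt : m < Q'.foldl min q := by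
      rcases hmin_mem with h | h
      · omega
      · exact hQ _ (List.mem_cons_of_mem _ h)
    have hmax_ge : q ≤ Q'.foldl max q := (PySem.List.le_foldl_max Q' q).1
    simp only [List.foldl_cons, altStep_eq]
    rw [if_pos (by omega)]
    rw [show min (Q'.foldl min q) m = m by omega]
    rw [show max (Q'.foldl max q) m = Q'.foldl max q by omega]
    obtain ⟨hf1, hf2⟩ := fold_frozen t m (Q'.foldl max q) (Q'.foldl max q) ht
    rw [hf1, hf2]
    rw [show max m q = q by omega]

-- A-side: first index of L in Q ++ m :: t is past Q when L ∉ Q, L ≠ m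
theorem index_past (Q t : List Int) (m L : Int) (hLQ : L ∉ Q) (hLm : L ≠ m) (hLt : L ∈ t) :
    ∃ k, PySem.List.index? (Q ++ m :: t) L = some k ∧ Q.length < k := by
  have hmem : L ∈ Q ++ m :: t := List.mem_append_right _ (List.mem_cons_of_mem _ hLt)
  have hsome := (PySem.List.index?_isSome_iff (Q ++ m :: t) L).mpr hmem
  obtain ⟨k, hk⟩ := Option.isSome_iff_exists.mp hsome
  refine ⟨k, hk, ?_⟩
  obtain ⟨hklt, hget, hbefore⟩ := PySem.List.getElem_of_index?_eq_some hk
  by_contra hle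
  push_neg at hle
  rcases Nat.lt_or_ge k Q.length with hlt | hge
  · have he : (Q ++ m :: t)[k] = Q[k]'hlt := List.getElem_append_left hlt
    rw [he] at hget
    exact hLQ (hget ▸ List.getElem_mem hlt)
  · have hkQ : k = Q.length := by omega
    subst hkQ
    have he : (Q ++ m :: t)[Q.length] = m := by
      rw [List.getElem_append_right (Nat.le_refl _)]
      simp
    rw [he] at hget
    exact hLm hget.symm

-- A-side: when the max L already occurs in the prefix Q ++ [m], the loop returns L - m = prefix-max - m
theorem loop_exit (Q t : List Int) (m L : Int)
    (hQ : ∀ q ∈ Q, m < q) (hmQ : m ∉ Q) (hLQm : L ∈ Q ∨ L = m)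
    (hLmax : ∀ y ∈ Q ++ m :: t, y ≤ L) :
    solutionLoop (Q ++ m :: t) L m = Q.foldl max m - m := by
  have hidxm : PySem.List.index? (Q ++ m :: t) m = some Q.length := by
    rw [PySem.List.index?_eq_some_iff]
    exact ⟨Q, t, rfl, rfl, hmQ⟩
  have hidxL : ∃ j, PySem.List.index? (Q ++ m :: t) L = some j ∧ j ≤ Q.length := by
    rcases hLQm with hLQ | rfl
    · have hsome := (PySem.List.index?_isSome_iff Q L).mpr hLQ
      obtain ⟨j, hj⟩ := Option.isSome_iff_exists.mp hsome
      obtain ⟨hjlt, _, _⟩ := PySem.List.getElem_of_index?_eq_some hj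
      exact ⟨j, by rw [PySem.List.index?_append_of_mem _ hLQ]; exact hj, Nat.le_of_lt hjlt⟩
    · exact ⟨Q.length, hidxm, Nat.le_refl _⟩
  obtain ⟨j, hjeq, hjle⟩ := hidxL
  rw [solutionLoop, hjeq, hidxm]
  simp only [Option.getD_some]
  rw [if_neg (by omega)]
  have hle := PySem.List.le_foldl_max Q m
  have hmem := PySem.List.foldl_max_mem Q m
  have hPMd : Q.foldl max m ∈ Q ++ m :: t := by
    rcases hmem with h | h
    · rw [h]; exact List.mem_append_right _ List.mem_cons_self
    · exact List.mem_append_left _ h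
  have h1 : Q.foldl max m ≤ L := hLmax _ hPMd
  have h2 : L ≤ Q.foldl max m := by
    rcases hLQm with hLQ | rfl
    · exact hle.2 L hLQ
    · exact hle.1
  omega

-- A-side loop: returns prefix-max minus min on the canonical decomposition
theorem loop_spec : ∀ (n : Nat) (Q t : List Int) (m L : Int), t.length ≤ n →
    (∀ q ∈ Q, m < q) → (∀ y ∈ t, m ≤ y) → (m ∉ Q) →
    PySem.List.max? (Q ++ m :: t) (fun y => y) = some L →
    solutionLoop (Q ++ m :: t) L m = Q.foldl max m - m := by
  intro n
  induction n with
  | zero =>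
    intro Q t m L hlen hQ ht hmQ hL
    have ht0 : t = [] := List.eq_nil_of_length_eq_zero (Nat.le_zero.mp hlen)
    subst ht0
    have hLmem := PySem.List.max?_mem hL
    have hLmax := PySem.List.max?_isMax hL
    have hLQm : L ∈ Q ∨ L = m := by
      rcases List.mem_append.mp hLmem with h | h
      · exact Or.inl h
      · simp at h; exact Or.inr h
    exact loop_exit Q [] m L hQ hmQ hLQm hLmax
  | succ n ih =>
    intro Q t m L hlen hQ ht hmQ hL
    have hLmem := PySem.List.max?_mem hL
    have hLmax := PySem.List.max?_isMax hL
    by_cases hcase : L ∈ Q ∨ L = m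
    · exact loop_exit Q t m L hQ hmQ hcase hLmax
    · push_neg at hcase
      obtain ⟨hLQ, hLm⟩ := hcase
      have hLt : L ∈ t := by
        rcases List.mem_append.mp hLmem with h | h
        · exact absurd h hLQ
        · rcases List.mem_cons.mp h with h | h
          · exact absurd h hLm
          · exact h
      obtain ⟨k, hidxL, hkgt⟩ := index_past Q t m L hLQ hLm hLt
      have hidxm : PySem.List.index? (Q ++ m :: t) m = some Q.length := by
        rw [PySem.List.index?_eq_some_iff]
        exact ⟨Q, t, rfl, rfl, hmQ⟩
      have hLd : L ∈ Q ++ m :: t := hLmem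
      have herase : (Q ++ m :: t).erase L = Q ++ m :: t.erase L := by
        rw [List.erase_append_right _ hLQ, List.erase_cons_tail]
        simp [Ne.symm hLm]
      rw [solutionLoop, hidxL, hidxm]
      simp only [Option.getD_some]
      rw [if_pos hkgt]
      split
      · rename_i d' hrem
        have hv := PySem.List.remove?_eq_some_erase (Q ++ m :: t) L hLd
        rw [hrem] at hv
        injection hv with hv
        subst hv
        rw [herase]
        split
        · rename_i l' hmax'
          have hlen' : (t.erase L).length ≤ n := by
            have h1 := List.length_erase_of_mem hLt
            have h2 := List.length_pos_of_mem hLt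
            omega
          exact ih Q (t.erase L) m l' hlen' hQ
            (fun y hy => ht y (List.mem_of_mem_erase hy)) hmQ hmax'
        · rename_i hmax'
          have : (Q ++ m :: t.erase L) = [] := (PySem.List.max?_eq_none_iff _ _).mp hmax'
          simp at this
      · rename_i hrem
        exact absurd hLd ((PySem.List.remove?_eq_none_iff _ _).mp hrem)

-- ===== VERDICT (by name: the statement is the Claim_ definition above) =====
theorem solution_spec : Claim_equal_solution := by
  intro data _ hpre
  unfold Spec_solution
  rcases hmin : PySem.List.min? data (fun y => y) with _ | m
  · exact absurd ((PySem.List.min?_eq_none_iff _ _).mp hmin) hpre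
  rcases hmax : PySem.List.max? data (fun y => y) with _ | L
  · exact absurd ((PySem.List.max?_eq_none_iff _ _).mp hmax) hpre
  have hmmem := PySem.List.min?_mem hmin
  have hmin_le := PySem.List.min?_isMin hmin
  have hsome := (PySem.List.index?_isSome_iff data m).mpr hmmem
  obtain ⟨k, hk⟩ := Option.isSome_iff_exists.mp hsome
  obtain ⟨Q, t, hdata, hklen, hmQ⟩ := (PySem.List.index?_eq_some_iff data m k).mp hk
  subst hdata
  have hQ : ∀ q ∈ Q, m < q := by
    intro q hq
    have h1 := hmin_le q (List.mem_append_left _ hq)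
    have h2 : q ≠ m := fun he => hmQ (he ▸ hq)
    simp only at h1
    omega
  have ht : ∀ y ∈ t, m ≤ y := by
    intro y hy
    have := hmin_le y (List.mem_append_right _ (List.mem_cons_of_mem _ hy))
    simpa using this
  have hA : solution (Q ++ m :: t) = Q.foldl max m - m := by
    unfold solution
    rw [hmin, hmax]
    exact loop_spec t.length Q t m L (Nat.le_refl _) hQ ht hmQ hmax
  rw [hA, alt_spec Q t m hQ ht]
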